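-- pv_equiv track=rewrite | github.com/sp9028/Programiranje_1 | Rešitve starih izpitov/11.8.1.py | najvecji_v_vseh
-- ===== SOURCE A (Python) =====
-- def najvecji_v_vseh(s):
--     # Če naloga hoče da ni prepočasna uporabi množice slovarje itd in ne seznamov
--     if not s:
--         return None
--     presek = set(s[0])
--     for t in s:
--         presek &= set(t)
--     if presek:
--         return max(presek)
-- ===== SOURCE B (Python) =====
-- def najvecji_v_vseh(s):
--     n = len(s)
--     counts = {}
--     for t in s:
--         for x in set(t):
--             counts[x] = counts.get(x, 0) + 1
--     best = None
--     for x, c in counts.items():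
--         if c == n and (best is None or x > best):
--             best = x
--     return best
-- ===== Notes on version B (the rewrite author's own statement) =====
-- stated objective: alternative
-- what changed: Replaces the repeated set-intersection loop with a single frequency table (count in how many collections each distinct element appears) followed by one running-max pass over elements whose count equals len(s).
import Mathlib
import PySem

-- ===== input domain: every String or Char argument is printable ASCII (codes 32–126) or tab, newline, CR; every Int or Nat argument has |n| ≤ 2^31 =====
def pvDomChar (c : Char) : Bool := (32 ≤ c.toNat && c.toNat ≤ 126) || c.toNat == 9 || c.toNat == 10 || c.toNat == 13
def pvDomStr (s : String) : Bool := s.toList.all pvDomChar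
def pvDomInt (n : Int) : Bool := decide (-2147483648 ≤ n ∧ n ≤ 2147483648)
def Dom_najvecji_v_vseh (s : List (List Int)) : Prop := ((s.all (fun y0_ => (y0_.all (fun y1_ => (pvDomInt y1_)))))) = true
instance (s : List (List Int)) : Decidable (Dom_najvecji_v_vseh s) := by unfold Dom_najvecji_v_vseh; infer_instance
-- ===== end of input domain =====

-- B replaces A's repeated set-intersection with a membership-count table plus one
-- running-max pass over elements counted in every collection (alternative decomposition).


-- ===== PORT A =====
def najvecji_v_vseh (s : List (List Int)) : Option Int :=
  match s with
  | [] => none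
  | h :: _ =>
    let presek := s.foldl (fun p t => PySem.Set.inter p (PySem.Set.ofList t)) (PySem.Set.ofList h)
    if presek ≠ [] then PySem.List.max? presek (fun x => x) else none

-- ===== PORT B =====
def najvecji_v_vseh_alt (s : List (List Int)) : Option Int :=
  let n : Int := s.length
  let counts : PySem.Dict Int Int :=
    s.foldl (fun d t => (PySem.Set.ofList t).foldl (fun d x => d.insert x (d.getD x 0 + 1)) d)
      PySem.Dict.empty
  counts.items.foldl
    (fun best p =>
      if p.2 == n && (match best with | none => true | some b => decide (b < p.1)) then some p.1
      else best)
    none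

-- ===== PRECONDITION & SPEC =====
def Spec_najvecji_v_vseh (s : List (List Int)) (out : Option Int) : Prop := out = najvecji_v_vseh_alt s
instance (s : List (List Int)) (out : Option Int) : Decidable (Spec_najvecji_v_vseh s out) := by unfold Spec_najvecji_v_vseh; infer_instance

-- ===== CLAIM (what is proved, stated in full; the proofs are below) =====
def Claim_equal_najvecji_v_vseh : Prop := ∀ (s : List (List Int)), Dom_najvecji_v_vseh s → Spec_najvecji_v_vseh s (najvecji_v_vseh s)

-- ===== LEMMAS AND PROOFS =====

-- A's intersection loop: membership characterisation.
theorem pv_interFold_mem (l : List (List Int)) (p0 : List Int) (x : Int) :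
    (x ∈ l.foldl (fun p t => PySem.Set.inter p (PySem.Set.ofList t)) p0) ↔
      (x ∈ p0 ∧ ∀ t ∈ l, x ∈ t) := by
  induction l generalizing p0 with
  | nil => simp
  | cons t l ih =>
    simp only [List.foldl_cons, ih, PySem.Set.mem_inter, PySem.Set.mem_ofList, List.mem_cons]
    constructor
    · rintro ⟨⟨hp, ht⟩, hall⟩
      exact ⟨hp, fun u hu => by rcases hu with rfl | hu; exacts [ht, hall u hu]⟩
    · rintro ⟨hp, hall⟩
      exact ⟨⟨hp, hall t (Or.inl rfl)⟩, fun u hu => hall u (Or.inr hu)⟩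

-- B's counter equals PySem.Dict.counter of the flattened distinct-element lists.
theorem pv_counts_eq (s : List (List Int)) :
    s.foldl (fun d t => (PySem.Set.ofList t).foldl (fun d x => d.insert x (d.getD x 0 + 1)) d)
      PySem.Dict.empty
    = PySem.Dict.counter ((s.map (fun t => PySem.Set.ofList t)).flatten) := by
  rw [← PySem.Dict.foldl_insert_getD_add_one_eq_counter, List.foldl_flatten, List.foldl_map]

-- Count of x in the flattened distinct lists = number of collections containing x.
theorem pv_count_flatten (s : List (List Int)) (x : Int) :
    ((s.map (fun t => PySem.Set.ofList t)).flatten).count x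
      = s.countP (fun t => decide (x ∈ t)) := by
  induction s with
  | nil => simp
  | cons t l ih =>
    simp only [List.map_cons, List.flatten_cons, List.count_append, ih, List.countP_cons]
    rw [List.Nodup.count (PySem.Set.nodup_ofList t)]
    by_cases hx : x ∈ t <;> simp [PySem.Set.mem_ofList, hx, Nat.add_comm]

-- B's running-max step over an already-seen accumulator is a plain running max.
theorem pv_omax_some (V : List Int) (b : Int) :
    V.foldl (fun best x => if (match best with | none => true | some c => decide (c < x)) then some x else best)
      (some b) = some (V.foldl max b) := by
  induction V generalizing b with
  | nil => rfl
  | cons v V ih =>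
    simp only [List.foldl_cons]
    by_cases h : b < v
    · simp [h, ih, max_eq_right (le_of_lt h)]
    · simp [h, ih, max_eq_left (le_of_not_gt h)]

-- B's running-max fold from none: none on [], otherwise the maximum of the list.
theorem pv_omax_char (V : List Int) :
    V.foldl (fun best x => if (match best with | none => true | some c => decide (c < x)) then some x else best)
      none
    = match V with
      | [] => none
      | v :: V' => some (V'.foldl max v) := by
  cases V with
  | nil => rfl
  | cons v V' => simp [pv_omax_some]

-- B's result is the running-max fold over the keys whose count is len(s).
theorem pv_alt_eq (s : List (List Int)) :
    najvecji_v_vseh_alt s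
    = ((PySem.Set.ofList ((s.map (fun t => PySem.Set.ofList t)).flatten)).filter
        (fun k => ((((s.map (fun t => PySem.Set.ofList t)).flatten).count k : Int) == (s.length : Int)))).foldl
        (fun best x => if (match best with | none => true | some c => decide (c < x)) then some x else best)
        none := by
  unfold najvecji_v_vseh_alt
  simp only [pv_counts_eq, PySem.Dict.items_counter, List.foldl_map]
  refine Eq.trans
    (PySem.List.foldl_congr_mem _ _
      (fun best k =>
        if ((((s.map (fun t => PySem.Set.ofList t)).flatten).count k : Int) == (s.length : Int)) then
          (if (match best with | none => true | some c => decide (c < k)) then some k else best)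
        else best)
      none ?_)
    (PySem.List.foldl_if_eq_foldl_filter
      (fun k => ((((s.map (fun t => PySem.Set.ofList t)).flatten).count k : Int) == (s.length : Int)))
      (fun best k => if (match best with | none => true | some c => decide (c < k)) then some k else best)
      _ none)
  intro best k _
  cases h1 : ((((s.map (fun t => PySem.Set.ofList t)).flatten).count k : Int) == (s.length : Int)) <;>
    cases best <;> simp [h1]

-- Membership in B's filtered key list coincides with membership in A's intersection.
theorem pv_mem_iff (h : List Int) (rest : List (List Int)) (x : Int) :
    (x ∈ (PySem.Set.ofList (((h :: rest).map (fun t => PySem.Set.ofList t)).flatten)).filter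
        (fun k => (((((h :: rest).map (fun t => PySem.Set.ofList t)).flatten).count k : Int) == ((h :: rest).length : Int))))
    ↔ x ∈ (h :: rest).foldl (fun p t => PySem.Set.inter p (PySem.Set.ofList t)) (PySem.Set.ofList h) := by
  rw [pv_interFold_mem, List.mem_filter]
  simp only [PySem.Set.mem_ofList, beq_iff_eq, Int.natCast_inj, pv_count_flatten,
    List.countP_eq_length, PySem.Set.mem_ofList, List.mem_flatten, List.mem_map]
  constructor
  · rintro ⟨-, hall⟩
    have hx : ∀ t ∈ h :: rest, x ∈ t := fun t ht => by simpa using hall t ht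
    exact ⟨hx h (List.mem_cons_self ..), hx⟩
  · rintro ⟨hxh, hall⟩
    refine ⟨⟨PySem.Set.ofList h, ⟨h, List.mem_cons_self .., rfl⟩, by simpa [PySem.Set.mem_ofList] using hxh⟩,
      fun t ht => by simpa using hall t ht⟩

-- ===== VERDICT (by name: the statement is the Claim_ definition above) =====
theorem najvecji_v_vseh_spec : Claim_equal_najvecji_v_vseh := by
  intro s _
  unfold Spec_najvecji_v_vseh
  cases s with
  | nil => rfl
  | cons h rest =>
    rw [pv_alt_eq]
    set F := (PySem.Set.ofList (((h :: rest).map (fun t => PySem.Set.ofList t)).flatten)).filter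
        (fun k => (((((h :: rest).map (fun t => PySem.Set.ofList t)).flatten).count k : Int) == ((h :: rest).length : Int))) with hF
    set P := (h :: rest).foldl (fun p t => PySem.Set.inter p (PySem.Set.ofList t)) (PySem.Set.ofList h) with hP
    have hmem : ∀ x, x ∈ F ↔ x ∈ P := fun x => pv_mem_iff h rest x
    show najvecji_v_vseh (h :: rest) = _
    rw [pv_omax_char]
    cases hFc : F with
    | nil =>
      have hPnil : P = [] := by
        rcases List.eq_nil_or_concat P with hnil | ⟨V, a, hc⟩
        · exact hnil
        · exact absurd ((hmem a).mpr (by simp [hc])) (by simp [hFc])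
      simp [najvecji_v_vseh, ← hP, hPnil]
    | cons v V' =>
      have hvP : v ∈ P := (hmem v).mp (by simp [hFc])
      have hPne : P ≠ [] := fun hc => by simp [hc] at hvP
      obtain ⟨mA, hmA⟩ : ∃ mA, PySem.List.max? P (fun x => x) = some mA := by
        cases hm : PySem.List.max? P (fun x => x) with
        | none => exact absurd ((PySem.List.max?_eq_none_iff P (fun x => x)).mp hm) hPne
        | some m => exact ⟨m, rfl⟩
      have hAeq : najvecji_v_vseh (h :: rest) = some mA := by
        simp [najvecji_v_vseh, ← hP, hPne, hmA]
      set mB := V'.foldl max v with hmB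
      have hmBF : mB ∈ F := by
        rcases PySem.List.foldl_max_mem V' v with hc | hc
        · rw [hmB, hc, hFc]; simp
        · rw [hFc]; exact List.mem_cons_of_mem _ hc
      have hmBmax : ∀ y ∈ F, y ≤ mB := by
        intro y hy
        rw [hFc] at hy
        rcases List.mem_cons.mp hy with rfl | hy
        · exact (PySem.List.le_foldl_max V' y).1
        · exact (PySem.List.le_foldl_max V' v).2 y hy
      have h1 : mA ≤ mB := hmBmax mA ((hmem mA).mpr (PySem.List.max?_mem hmA))
      have h2 : mB ≤ mA := by
        have := PySem.List.max?_isMax hmA mB ((hmem mB).mp hmBF)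
        simpa using this
      rw [hAeq, le_antisymm h1 h2]
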